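-- pv_equiv track=rewrite | github.com/Elgiambu/Int_Programacion | pyhton/Practica7/clase_listas (1).py | CerosEnPosicionesPares2
-- ===== SOURCE A (Python) =====
-- from typing import List
--
-- def CerosEnPosicionesPares2(s: List[int]) -> List[int]:
--     resultado: List[int] = []
--     for i in range(len(s)):
--         if i % 2 == 0:
--             resultado.append(0)
--         else:
--             resultado.append(s[i])
--     return resultado
-- ===== SOURCE B (Python) =====
-- from typing import List
--
-- def CerosEnPosicionesPares2(s: List[int]) -> List[int]:
--     resultado: List[int] = list(s)
--     resultado[0::2] = [0] * ((len(s) + 1) // 2)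
--     return resultado
-- ===== Notes on version B (the rewrite author's own statement) =====
-- stated objective: idiomatic
-- what changed: Replaces the explicit index loop with even/odd branch by copying the list and bulk-zeroing the even positions with one strided slice assignment.
import Mathlib
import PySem

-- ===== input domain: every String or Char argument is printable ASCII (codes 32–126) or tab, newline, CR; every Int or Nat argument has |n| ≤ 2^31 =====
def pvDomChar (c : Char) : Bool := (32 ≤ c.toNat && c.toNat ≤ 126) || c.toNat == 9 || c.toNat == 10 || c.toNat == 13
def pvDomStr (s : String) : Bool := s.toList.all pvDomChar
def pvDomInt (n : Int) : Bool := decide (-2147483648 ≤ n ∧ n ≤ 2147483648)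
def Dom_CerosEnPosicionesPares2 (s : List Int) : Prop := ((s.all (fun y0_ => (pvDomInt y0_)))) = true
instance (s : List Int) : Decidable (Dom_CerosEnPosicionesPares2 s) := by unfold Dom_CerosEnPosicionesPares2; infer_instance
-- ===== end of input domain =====

-- B copies the input and bulk-zeroes the even positions with one strided slice
-- assignment instead of A's index loop with an even/odd branch (objective: idiomatic).


-- ===== PORT A =====
def CerosEnPosicionesPares2 (s : List Int) : List Int :=
  (PySem.List.pyRange 0 s.length 1).foldl
    (fun resultado i =>
      if i % 2 == 0 then resultado ++ [0]
      else resultado ++ [PySem.List.pyGetD s i 0]) []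

-- ===== PORT B =====
-- extended-slice assignment resultado[0::2] = vs : write vs at indices 0,2,4,…
def pvAssignStride2 : List Int → List Int → List Int
  | xs, [] => xs
  | [], _ => []
  | [_], v :: _ => [v]
  | _ :: b :: rest, v :: vs => v :: b :: pvAssignStride2 rest vs

def CerosEnPosicionesPares2_alt (s : List Int) : List Int :=
  pvAssignStride2 s
    (List.replicate (PySem.Int.floordiv ((s.length : Int) + 1) 2).toNat 0)

-- ===== PRECONDITION & SPEC =====
def Spec_CerosEnPosicionesPares2 (s : List Int) (out : List Int) : Prop := out = CerosEnPosicionesPares2_alt s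
instance (s : List Int) (out : List Int) : Decidable (Spec_CerosEnPosicionesPares2 s out) := by unfold Spec_CerosEnPosicionesPares2; infer_instance

-- ===== CLAIM (what is proved, stated in full; the proofs are below) =====
def Claim_equal_CerosEnPosicionesPares2 : Prop := ∀ (s : List Int), Dom_CerosEnPosicionesPares2 s → Spec_CerosEnPosicionesPares2 s (CerosEnPosicionesPares2 s)

-- ===== LEMMAS AND PROOFS =====

-- A's append-loop is the map of the branch over the range
theorem pvFoldA (s : List Int) (l : List Int) (init : List Int) :
    l.foldl (fun resultado i =>
      if i % 2 == 0 then resultado ++ [0]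
      else resultado ++ [PySem.List.pyGetD s i 0]) init
    = init ++ l.map (fun i => if i % 2 == 0 then 0 else PySem.List.pyGetD s i 0) := by
  induction l generalizing init with
  | nil => simp
  | cons x xs ih =>
      simp only [List.foldl_cons, List.map_cons]
      split_ifs with h <;> rw [ih] <;> simp

theorem pvZerosLen (n : Nat) :
    (PySem.Int.floordiv ((n : Int) + 1) 2).toNat = (n + 1) / 2 := by
  simp only [PySem.Int.floordiv]
  rw [Int.fdiv_eq_ediv]
  simp
  omega

theorem pvMain : ∀ (s : List Int),
    (PySem.List.pyRange 0 s.length 1).map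
      (fun i => if i % 2 == 0 then 0 else PySem.List.pyGetD s i 0)
    = CerosEnPosicionesPares2_alt s
  | [] => by decide
  | [a] => by
      rw [show ([a] : List Int).length = 1 from rfl]
      rw [show PySem.List.pyRange 0 ((1 : Nat) : Int) 1 = [0] from by decide]
      simp only [CerosEnPosicionesPares2_alt]
      norm_num [pvAssignStride2, PySem.Int.floordiv]
  | a :: b :: t => by
      have ih := pvMain t
      rw [CerosEnPosicionesPares2_alt, pvZerosLen t.length] at ih
      have htail :
          (PySem.List.pyRange (0+1+1) (((a :: b :: t).length : Nat) : Int) 1).map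
            (fun i => if i % 2 == 0 then 0 else PySem.List.pyGetD (a :: b :: t) i 0)
          = (PySem.List.pyRange 0 ((t.length : Nat) : Int) 1).map
            (fun i => if i % 2 == 0 then 0 else PySem.List.pyGetD t i 0) := by
        rw [PySem.List.pyRange_one 0 (t.length : Int),
            PySem.List.pyRange_one (0+1+1) (((a :: b :: t).length : Nat) : Int)]
        rw [show (((a :: b :: t).length : Nat) : Int) - (0+1+1) = ((t.length : Nat) : Int) - 0 from by
          push_cast; simp; ring]
        simp only [List.map_map]
        apply List.map_congr_left
        intro k hk
        simp only [List.mem_range] at hk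
        simp only [Function.comp]
        have h2 : ((0:Int)+1+1+k) % 2 = ((0:Int)+k) % 2 := by omega
        rw [h2]
        by_cases hc : ((0:Int)+k) % 2 = 0
        · have hdvd : (2:Int) ∣ (k:Int) := by omega
          simp [hdvd]
        · simp only [beq_iff_eq, if_neg hc]
          rw [show (0:Int)+1+1+(k:Int) = ((k+2 : Nat) : Int) from by push_cast; ring,
              show (0:Int)+(k:Int) = ((k : Nat) : Int) from by ring]
          rw [PySem.List.pyGetD_natCast, PySem.List.pyGetD_natCast]
          simp [List.getD]
      rw [CerosEnPosicionesPares2_alt]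
      rw [show (a :: b :: t).length = t.length + 2 from by simp]
      rw [pvZerosLen (t.length + 2)]
      rw [show (t.length + 2 + 1) / 2 = (t.length + 1) / 2 + 1 from by omega,
          List.replicate_succ, pvAssignStride2]
      rw [PySem.List.pyRange_one_cons (by push_cast; omega : (0:Int) < ((t.length + 2 : Nat) : Int))]
      rw [PySem.List.pyRange_one_cons (by push_cast; omega : (0+1:Int) < ((t.length + 2 : Nat) : Int))]
      simp only [List.map_cons]
      rw [show ((t.length + 2 : Nat) : Int) = (((a :: b :: t).length : Nat) : Int) from by simp; omega] at *
      rw [htail, ih]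
      norm_num [PySem.List.pyGetD, PySem.List.pyGet?, PySem.List.pyIdx?]

-- ===== VERDICT (by name: the statement is the Claim_ definition above) =====
theorem CerosEnPosicionesPares2_spec : Claim_equal_CerosEnPosicionesPares2 := by
  intro s _
  unfold Spec_CerosEnPosicionesPares2 CerosEnPosicionesPares2
  rw [pvFoldA, List.nil_append]
  exact pvMain s
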